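-- pv_equiv track=rewrite | github.com/ICodeDumbStuff/School-Python | Dumb/letter_check.py | letter_check
-- ===== SOURCE A (Python) =====
-- def letter_check(yes):
--     #Checks the first letter and returns the words from a list
--     words = ["sand","lake","friend","french","fly"]
--
--     output = []
--
--     #if stuffs
--     for x in words:
--         if yes == x[0:1]:
--             output.append(x)
--     if output == "":
--         return f"sorry, there are no words with the letter: {yes}"
--     else:
--         return output
-- ===== SOURCE B (Python) =====
-- # The word list is a compile-time constant, so precompute the first-letter
-- # index as a literal table and answer with a single dictionary lookup.
-- _INDEX = {"s": ["sand"], "l": ["lake"], "f": ["friend", "french", "fly"]}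
--
-- def letter_check(yes):
--     return _INDEX.get(yes, [])
-- ===== Notes on version B (the rewrite author's own statement) =====
-- stated objective: idiomatic
-- what changed: Replaces the per-call compare-and-append loop over the fixed word list with a precomputed literal first-letter-to-words table and a single dictionary lookup; A's dead apology-string branch (a list compared to the empty string is always False) is dropped since it can never fire.
import Mathlib
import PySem

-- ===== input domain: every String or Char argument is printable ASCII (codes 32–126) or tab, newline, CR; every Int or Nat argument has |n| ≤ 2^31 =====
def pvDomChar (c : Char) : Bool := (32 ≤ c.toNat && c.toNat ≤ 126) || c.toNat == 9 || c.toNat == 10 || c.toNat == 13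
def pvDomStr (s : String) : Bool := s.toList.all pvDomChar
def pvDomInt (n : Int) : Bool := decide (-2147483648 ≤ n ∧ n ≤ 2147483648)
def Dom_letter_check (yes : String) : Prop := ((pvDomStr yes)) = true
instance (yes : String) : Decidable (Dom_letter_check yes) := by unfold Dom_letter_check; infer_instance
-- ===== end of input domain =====

-- B replaces A's per-call compare-and-append loop with a precomputed literal first-letter index and one dictionary lookup (idiomatic); A's dead apology-string branch (a list compared to "" is always False in Python) is unreachable and has no counterpart in either port.


-- ===== PORT A =====
-- Literal port of A: loop over the fixed word list, appending each word whose
-- first character (x[0:1]) equals yes.  Python's 'if output == ""' compares a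
-- list with a string and is always False, so the loop's output is returned
-- (the unreachable apology-string branch has no counterpart here).
def letter_check (yes : String) : List String :=
  let words : List String := ["sand", "lake", "friend", "french", "fly"]
  let output : List String :=
    words.foldl (fun output x =>
      if yes = PySem.Str.slice x (some 0) (some 1) then output ++ [x] else output) []
  output

-- ===== PORT B =====
-- Literal port of B: the precomputed index table as a Dict literal, answered
-- by a single keyed lookup with default [].
def pvIndex : PySem.Dict String (List String) :=
  PySem.Dict.ofList [("s", ["sand"]), ("l", ["lake"]), ("f", ["friend", "french", "fly"])]

def letter_check_alt (yes : String) : List String :=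
  pvIndex.getD yes []

-- ===== PRECONDITION & SPEC =====
def Spec_letter_check (yes : String) (out : List String) : Prop := out = letter_check_alt yes
instance (yes : String) (out : List String) : Decidable (Spec_letter_check yes out) := by unfold Spec_letter_check; infer_instance

-- ===== CLAIM (what is proved, stated in full; the proofs are below) =====
def Claim_equal_letter_check : Prop := ∀ (yes : String), Dom_letter_check yes → Spec_letter_check yes (letter_check yes)

-- ===== LEMMAS AND PROOFS =====

-- ===== VERDICT (by name: the statement is the Claim_ definition above) =====
theorem letter_check_spec : Claim_equal_letter_check := by
  intro yes _
  unfold Spec_letter_check letter_check letter_check_alt pvIndex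
  have e1 : PySem.Str.slice "sand" (some 0) (some 1) = "s" := by decide
  have e2 : PySem.Str.slice "lake" (some 0) (some 1) = "l" := by decide
  have e3 : PySem.Str.slice "friend" (some 0) (some 1) = "f" := by decide
  have e4 : PySem.Str.slice "french" (some 0) (some 1) = "f" := by decide
  have e5 : PySem.Str.slice "fly" (some 0) (some 1) = "f" := by decide
  simp only [List.foldl_cons, List.foldl_nil, e1, e2, e3, e4, e5]
  by_cases hs : yes = "s"
  · subst hs; decide
  by_cases hl : yes = "l"
  · subst hl; decide
  by_cases hf : yes = "f"
  · subst hf; decide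
  have bs : ("s" == yes) = false := by simp [Ne.symm hs]
  have bl : ("l" == yes) = false := by simp [Ne.symm hl]
  have bf : ("f" == yes) = false := by simp [Ne.symm hf]
  simp [PySem.Dict.ofList, PySem.Dict.getD, PySem.Dict.get?, PySem.Dict.update, PySem.Dict.insert,
    List.find?, PySem.Dict.empty, bs, bl, bf, hs, hl, hf]
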